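-- pv_equiv track=rewrite | github.com/bakunobu/exercise | 1400_basic_tasks/chap_6/6_60.py | two_max_num
-- ===== SOURCE A (Python) =====
-- def two_max_num(n:int) -> tuple:
--     max_one = 0
--     max_two = 1
--     while n:
--         num = n % 10
--         if num > max_two:
--             max_one, max_two = max_two, num
--         elif num > max_one:
--             max_one = num
--         n //= 10
--     return(max_one, max_two)
-- ===== SOURCE B (Python) =====
-- def two_max_num(n: int) -> tuple:
--     digits = [0, 1]
--     while n:
--         digits.append(n % 10)
--         n //= 10
--     digits.sort()
--     return (digits[-2], digits[-1])
-- ===== Notes on version B (the rewrite author's own statement) =====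
-- stated objective: alternative
-- what changed: Replaces A's one-pass running top-two bookkeeping (two tracked maxima with swap logic) by collect-all-digits-then-sort-and-take-the-last-two, keeping the same digit-extraction loop (and A's 0/1 seed values) so behaviour, including non-termination on negative n, is identical.
import Mathlib
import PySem

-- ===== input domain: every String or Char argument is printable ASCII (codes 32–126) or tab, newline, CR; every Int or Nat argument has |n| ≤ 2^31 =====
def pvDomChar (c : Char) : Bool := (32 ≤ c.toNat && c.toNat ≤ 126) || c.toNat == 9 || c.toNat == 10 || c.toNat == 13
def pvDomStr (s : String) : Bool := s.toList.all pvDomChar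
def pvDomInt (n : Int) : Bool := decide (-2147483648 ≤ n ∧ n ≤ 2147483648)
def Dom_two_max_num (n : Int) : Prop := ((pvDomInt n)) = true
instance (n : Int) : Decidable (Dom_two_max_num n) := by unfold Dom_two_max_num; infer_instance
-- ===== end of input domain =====

-- B replaces A's one-pass running top-two tracking by collect-digits, sort, take last two.
-- Both Pythons use the same 'while n:' loop and so neither returns on n < 0; the fuelled
-- ports agree everywhere, so plain equivalence of the return values is proved.

-- ===== PORT A =====
-- the 'while n:' loop; fuel n.natAbs + 1 always suffices when n ≥ 0 (on n < 0 Python loops forever)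
def twoMaxLoopA (fuel : Nat) (n maxOne maxTwo : Int) : Int × Int :=
  match fuel with
  | 0 => (maxOne, maxTwo)
  | f + 1 =>
    if n ≠ 0 then
      let num := PySem.Int.mod n 10
      if num > maxTwo then twoMaxLoopA f (PySem.Int.floordiv n 10) maxTwo num
      else if num > maxOne then twoMaxLoopA f (PySem.Int.floordiv n 10) num maxTwo
      else twoMaxLoopA f (PySem.Int.floordiv n 10) maxOne maxTwo
    else (maxOne, maxTwo)

def two_max_num (n : Int) : Int × Int := twoMaxLoopA (n.natAbs + 1) n 0 1

-- ===== PORT B =====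
-- the same 'while n:' digit-collection loop of Source B, appending n % 10
def digitsLoopB (fuel : Nat) (n : Int) (acc : List Int) : List Int :=
  match fuel with
  | 0 => acc
  | f + 1 =>
    if n ≠ 0 then digitsLoopB f (PySem.Int.floordiv n 10) (acc ++ [PySem.Int.mod n 10])
    else acc

def two_max_num_alt (n : Int) : Int × Int :=
  let s := PySem.List.sorted (digitsLoopB (n.natAbs + 1) n [0, 1]) (fun x => x) false
  (((PySem.List.pyGet? s (-2)).getD 0), ((PySem.List.pyGet? s (-1)).getD 0))

-- ===== PRECONDITION & SPEC =====
def Spec_two_max_num (n : Int) (out : Int × Int) : Prop := out = two_max_num_alt n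
instance (n : Int) (out : Int × Int) : Decidable (Spec_two_max_num n out) := by unfold Spec_two_max_num; infer_instance

-- ===== CLAIM (what is proved, stated in full; the proofs are below) =====
def Claim_equal_two_max_num : Prop := ∀ (n : Int), Dom_two_max_num n → Spec_two_max_num n (two_max_num n)

-- ===== LEMMAS AND PROOFS =====

-- A's loop body as a fold step on the (max_one, max_two) pair
def stepT (p : Int × Int) (d : Int) : Int × Int :=
  if d > p.2 then (p.2, d) else if d > p.1 then (d, p.2) else p

-- the digit stream both loops traverse
def digs (fuel : Nat) (n : Int) : List Int :=
  match fuel with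
  | 0 => []
  | f + 1 => if n ≠ 0 then PySem.Int.mod n 10 :: digs f (PySem.Int.floordiv n 10) else []

-- (B's pyGet? accessor) the last two entries of a list
def lastTwo (l : List Int) : Int × Int :=
  (((PySem.List.pyGet? l (-2)).getD 0), ((PySem.List.pyGet? l (-1)).getD 0))

theorem twoMaxLoopA_eq_foldl (fuel : Nat) (n a b : Int) :
    twoMaxLoopA fuel n a b = List.foldl stepT (a, b) (digs fuel n) := by
  induction fuel generalizing n a b with
  | zero => rfl
  | succ f ih =>
    by_cases h : n = 0
    · simp [twoMaxLoopA, digs, h]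
    · simp only [twoMaxLoopA, digs, h, if_pos, ne_eq, not_false_eq_true, List.foldl_cons]
      split_ifs with h1 h2 <;> rw [ih] <;> congr 1 <;> simp_all [stepT, PySem.Int.mod] <;>
        rw [if_neg (by omega), if_neg (by omega)]

theorem digitsLoopB_eq (fuel : Nat) (n : Int) (acc : List Int) :
    digitsLoopB fuel n acc = acc ++ digs fuel n := by
  induction fuel generalizing n acc with
  | zero => simp [digitsLoopB, digs]
  | succ f ih =>
    by_cases h : n = 0
    · simp [digitsLoopB, digs, h]
    · simp [digitsLoopB, digs, h, ih]

theorem sorted_id_eq_insertionSort (l : List Int) :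
    PySem.List.sorted l (fun x => x) false = List.insertionSort (· ≤ ·) l := by
  exact PySem.List.sorted_id_eq_of_perm_of_pairwise l _ (List.perm_insertionSort _ l)
    (List.pairwise_insertionSort (· ≤ ·) l)

theorem lastTwo_cons_of_len (x : Int) (l : List Int) (h : 2 ≤ l.length) :
    lastTwo (x :: l) = lastTwo l := by
  obtain ⟨y, t, rfl⟩ : ∃ y t, l = y :: t := by
    cases l with
    | nil => simp at h
    | cons y t => exact ⟨y, t, rfl⟩
  unfold lastTwo
  rw [PySem.List.pyGet?_neg_ofNat (x :: y :: t) 2 (by norm_num) (by simp),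
      PySem.List.pyGet?_neg_ofNat (y :: t) 2 (by norm_num) (by simpa using h),
      PySem.List.pyGet?_neg_one, PySem.List.pyGet?_neg_one, List.getLast?_cons_cons]
  have h1 : (x :: y :: t).length - 2 = ((y :: t).length - 2) + 1 := by simp at h ⊢; omega
  rw [h1, List.getElem?_cons_succ]

theorem lastTwo_orderedInsert (m : Int) (s : List Int)
    (h : 2 ≤ (s.countP (fun x => decide (m ≤ x)))) :
    lastTwo (List.orderedInsert (· ≤ ·) m s) = lastTwo s := by
  induction s with
  | nil => simp at h
  | cons x t ih =>
    by_cases hx : m ≤ x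
    · rw [List.orderedInsert, if_pos hx]
      exact lastTwo_cons_of_len m (x :: t)
        (le_trans h (by simpa using List.countP_le_length (l := x :: t) (p := fun x => decide (m ≤ x))))
    · have ht : 2 ≤ t.countP (fun x => decide (m ≤ x)) := by
        simp [hx] at h; omega
      have htl : 2 ≤ t.length :=
        le_trans ht (List.countP_le_length (l := t) (p := fun x => decide (m ≤ x)))
      rw [List.orderedInsert, if_neg hx,
          lastTwo_cons_of_len x _ (by rw [(List.perm_orderedInsert (· ≤ ·) m t).length_eq]; simp; omega),
          ih ht, lastTwo_cons_of_len x t htl]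

-- equal multisets sort equally
theorem sortPermEq (l1 l2 : List Int) (h : l1.Perm l2) :
    List.insertionSort (· ≤ ·) l1 = List.insertionSort (· ≤ ·) l2 := by
  refine List.Perm.eq_of_pairwise (fun a b _ _ => le_antisymm)
    (List.pairwise_insertionSort _ _) (List.pairwise_insertionSort _ _) ?_
  exact (List.perm_insertionSort _ l1).trans (h.trans (List.perm_insertionSort _ l2).symm)

-- inserting an element below two existing ones leaves the top two of the sort unchanged
theorem lastTwo_sort_min (m a' b' : Int) (l : List Int) (h1 : m ≤ a') (h2 : m ≤ b') :
    lastTwo (List.insertionSort (· ≤ ·) (m :: a' :: b' :: l)) =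
    lastTwo (List.insertionSort (· ≤ ·) (a' :: b' :: l)) := by
  rw [show List.insertionSort (· ≤ ·) (m :: a' :: b' :: l) =
      List.orderedInsert (· ≤ ·) m (List.insertionSort (· ≤ ·) (a' :: b' :: l)) from rfl]
  apply lastTwo_orderedInsert
  rw [(List.perm_insertionSort (· ≤ ·) (a' :: b' :: l)).countP_eq]
  simp [h1, h2]

theorem foldl_stepT_eq_lastTwo_sort (l : List Int) (a b : Int) (hab : a ≤ b) :
    List.foldl stepT (a, b) l = lastTwo (List.insertionSort (· ≤ ·) (a :: b :: l)) := by
  induction l generalizing a b with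
  | nil =>
    rw [List.foldl_nil, show List.insertionSort (· ≤ ·) [a, b] =
        List.orderedInsert (· ≤ ·) a [b] from rfl, List.orderedInsert, if_pos hab]
    unfold lastTwo
    rw [PySem.List.pyGet?_neg_ofNat [a, b] 2 (by norm_num) (by simp), PySem.List.pyGet?_neg_one]
    simp
  | cons d l ih =>
    rw [List.foldl_cons]
    by_cases h1 : d > b
    · rw [show stepT (a, b) d = (b, d) from by simp [stepT, h1], ih b d (le_of_lt h1),
          sortPermEq (a :: b :: d :: l) (a :: (b :: d :: l)) (List.Perm.refl _)]
      exact (lastTwo_sort_min a b d l hab (le_of_lt (lt_of_le_of_lt hab h1))).symm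
    · by_cases h2 : d > a
      · rw [show stepT (a, b) d = (d, b) from by simp [stepT, h1, h2],
            ih d b (not_lt.mp h1),
            sortPermEq (a :: b :: d :: l) (a :: d :: b :: l)
              ((List.Perm.swap d b l).cons a)]
        exact (lastTwo_sort_min a d b l (le_of_lt h2) hab).symm
      · rw [show stepT (a, b) d = (a, b) from by simp [stepT, h1, h2], ih a b hab,
            sortPermEq (a :: b :: d :: l) (d :: a :: b :: l)
              (((List.Perm.swap d b l).cons a).trans (List.Perm.swap d a (b :: l)))]
        exact (lastTwo_sort_min d a b l (not_lt.mp h2) (le_trans (not_lt.mp h2) hab)).symm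

-- ===== VERDICT (by name: the statement is the Claim_ definition above) =====
theorem two_max_num_spec : Claim_equal_two_max_num := by
  intro n _
  unfold Spec_two_max_num two_max_num two_max_num_alt
  rw [twoMaxLoopA_eq_foldl, digitsLoopB_eq, sorted_id_eq_insertionSort]
  exact foldl_stepT_eq_lastTwo_sort _ 0 1 (by norm_num)
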